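-- pv_equiv track=rewrite | github.com/Tatiannna/leetcode | python/3285.py | stableMountains
-- ===== SOURCE A (Python) =====
-- from typing import List
--
-- def stableMountains(height: List[int], threshold: int) -> List[int]:
--     res = []
--     n = False
--
--     for i in range(len(height)):
--         if n:
--             res.append(i)
--             n = False
--         if height[i] > threshold:
--             n = True
--     return res
-- ===== SOURCE B (Python) =====
-- from typing import List
--
-- def stableMountains(height: List[int], threshold: int) -> List[int]:
--     # Stage 1: positions of elements exceeding the threshold.
--     tall = [j for j in range(len(height)) if height[j] > threshold]
--     # Stage 2: the last position cannot have a successor index.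
--     if tall and tall[-1] == len(height) - 1:
--         tall.pop()
--     # Stage 3: each remaining tall position makes its successor stable.
--     return [j + 1 for j in tall]
-- ===== Notes on version B (the rewrite author's own statement) =====
-- stated objective: alternative
-- what changed: Instead of A's single pass threading a carried boolean flag that emits the current index one iteration later, B runs a staged pipeline: collect the positions of elements exceeding the threshold, trim the final position if it is the last index, and shift the remaining positions by one.
import Mathlib
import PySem

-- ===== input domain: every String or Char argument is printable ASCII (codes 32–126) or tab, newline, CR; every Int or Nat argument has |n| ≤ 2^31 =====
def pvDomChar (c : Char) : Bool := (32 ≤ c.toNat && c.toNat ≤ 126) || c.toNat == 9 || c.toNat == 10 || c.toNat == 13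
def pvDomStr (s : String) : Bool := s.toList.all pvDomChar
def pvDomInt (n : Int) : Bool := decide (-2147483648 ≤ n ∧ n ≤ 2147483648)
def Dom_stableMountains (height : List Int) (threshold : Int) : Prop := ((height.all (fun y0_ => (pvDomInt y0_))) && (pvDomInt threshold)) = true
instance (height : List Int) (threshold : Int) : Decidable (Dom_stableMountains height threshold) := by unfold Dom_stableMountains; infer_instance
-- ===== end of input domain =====

-- B replaces A's flag-threading single pass with a staged pipeline (collect tall positions, trim the last index, shift by one); alternative decomposition, same cost.


-- ===== PORT A =====
-- for i in range(len(height)): if n: append i; n = False; if height[i] > threshold: n = True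
def stableMountains (height : List Int) (threshold : Int) : List Int :=
  ((PySem.List.pyRange 0 (height.length : Int) 1).foldl
    (fun (s : List Int × Bool) i =>
      let s1 := if s.2 then (s.1 ++ [i], false) else s
      (s1.1, decide (PySem.List.pyGetD height i 0 > threshold)))
    ([], false)).1

-- ===== PORT B =====
-- tall = [j for j in range(len(height)) if height[j] > threshold]
-- if tall and tall[-1] == len(height) - 1: tall.pop()
-- return [j + 1 for j in tall]
def stableMountains_alt (height : List Int) (threshold : Int) : List Int :=
  let tall := (PySem.List.pyRange 0 (height.length : Int) 1).filter
    (fun j => decide (PySem.List.pyGetD height j 0 > threshold))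
  let tall2 :=
    if tall ≠ [] ∧ PySem.List.pyGetD tall (-1) 0 = (height.length : Int) - 1
    then tall.dropLast else tall
  tall2.map (· + 1)

-- ===== PRECONDITION & SPEC =====
def Spec_stableMountains (height : List Int) (threshold : Int) (out : List Int) : Prop := out = stableMountains_alt height threshold
instance (height : List Int) (threshold : Int) (out : List Int) : Decidable (Spec_stableMountains height threshold out) := by unfold Spec_stableMountains; infer_instance

-- ===== CLAIM (what is proved, stated in full; the proofs are below) =====
def Claim_equal_stableMountains : Prop := ∀ (height : List Int) (threshold : Int), Dom_stableMountains height threshold → Spec_stableMountains height threshold (stableMountains height threshold)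

-- ===== LEMMAS AND PROOFS =====

-- Loop invariant for A's fold over range(k, k+m): the collected list is the pending flag's
-- contribution (index k, if the flag is set and the range is nonempty) followed by the
-- predecessor-test filter over the rest of the range.
theorem stableMountains_loop (height : List Int) (threshold : Int) :
    ∀ (m : Nat) (k : Int) (res : List Int) (b : Bool),
      (((PySem.List.pyRange k (k + m) 1).foldl
        (fun (s : List Int × Bool) i =>
          let s1 := if s.2 then (s.1 ++ [i], false) else s
          (s1.1, decide (PySem.List.pyGetD height i 0 > threshold)))
        (res, b)).1 : List Int)
      = res ++ (if b ∧ 0 < m then [k] else [])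
          ++ (PySem.List.pyRange (k + 1) (k + m) 1).filter
              (fun i => decide (PySem.List.pyGetD height (i - 1) 0 > threshold)) := by
  intro m
  induction m with
  | zero =>
    intro k res b
    simp
  | succ m ih =>
    intro k res b
    rw [PySem.List.pyRange_one_cons (by push_cast; omega : k < k + ((m : Nat) + 1 : Nat))]
    simp only [List.foldl_cons]
    have hrw : (k : Int) + ((m + 1 : Nat) : Int) = (k + 1) + (m : Nat) := by push_cast; ring
    rw [hrw, ih (k + 1)]
    by_cases hm : 0 < m
    · rw [PySem.List.pyRange_one_cons (by omega : k + 1 < (k + 1) + (m : Nat))]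
      simp only [List.filter_cons, add_sub_cancel_right]
      cases b <;> by_cases hc : PySem.List.pyGetD height k 0 > threshold <;>
        simp [hc, hm]
    · have hm0 : m = 0 := by omega
      subst hm0
      simp only [Nat.cast_zero, add_zero,
        PySem.List.pyRange_one_eq_nil (le_refl (k + 1))]
      cases b <;> by_cases hc : PySem.List.pyGetD height k 0 > threshold <;>
        simp [hc]

-- Shift lemma: mapping (+1) over the tall-position filter of range(k, k+m) is the
-- predecessor-test filter of range(k+1, k+m+1).
theorem stableMountains_shift (q : Int → Bool) :
    ∀ (m : Nat) (k : Int),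
      (((PySem.List.pyRange k (k + m) 1).filter q).map (· + 1))
      = (PySem.List.pyRange (k + 1) (k + 1 + m) 1).filter (fun i => q (i - 1)) := by
  intro m
  induction m with
  | zero =>
    intro k
    simp
  | succ m ih =>
    intro k
    rw [PySem.List.pyRange_one_cons (by push_cast; omega : k < k + ((m : Nat) + 1 : Nat)),
        PySem.List.pyRange_one_cons (by push_cast; omega : k + 1 < k + 1 + ((m : Nat) + 1 : Nat))]
    simp only [List.filter_cons, add_sub_cancel_right]
    have hrw : (k : Int) + ((m + 1 : Nat) : Int) = (k + 1) + (m : Nat) := by push_cast; ring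
    have hrw2 : (k + 1) + ((m + 1 : Nat) : Int) = (k + 1 + 1) + (m : Nat) := by push_cast; ring
    rw [hrw, hrw2]
    by_cases hq : q k = true
    · simp only [hq]
      simp [ih (k + 1)]
    · simp only [Bool.not_eq_true] at hq
      simp [hq, ih (k + 1)]

-- Trim lemma: for a nonempty list, trimming the final index from the tall filter of
-- range(0, n) leaves exactly the tall filter of range(0, n-1).
theorem stableMountains_trim (q : Int → Bool) (n : Nat) (hn : 0 < n) :
    (let tall := (PySem.List.pyRange 0 (n : Int) 1).filter q
     if tall ≠ [] ∧ PySem.List.pyGetD tall (-1) 0 = (n : Int) - 1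
     then tall.dropLast else tall)
    = (PySem.List.pyRange 0 ((n : Int) - 1) 1).filter q := by
  have hsplit : PySem.List.pyRange 0 (n : Int) 1
      = PySem.List.pyRange 0 ((n : Int) - 1) 1 ++ PySem.List.pyRange ((n : Int) - 1) (n : Int) 1 :=
    PySem.List.pyRange_one_append 0 ((n : Int) - 1) (n : Int) (by omega) (by omega)
  have hlastr : PySem.List.pyRange ((n : Int) - 1) (n : Int) 1 = [(n : Int) - 1] := by
    have := PySem.List.pyRange_one_singleton ((n : Int) - 1)
    rw [show ((n : Int) - 1) + 1 = (n : Int) by ring] at this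
    exact this
  have hmemP : ∀ x ∈ (PySem.List.pyRange 0 ((n : Int) - 1) 1).filter q, x < (n : Int) - 1 := by
    intro x hx
    have := (PySem.List.mem_pyRange_one).mp (List.mem_filter.mp hx).1
    omega
  rw [hsplit, hlastr]
  simp only [List.filter_append, List.filter_cons, List.filter_nil]
  set P := (PySem.List.pyRange 0 ((n : Int) - 1) 1).filter q with hP
  by_cases hq : q ((n : Int) - 1) = true
  · simp only [hq, if_true]
    have hne : P ++ [(n : Int) - 1] ≠ [] := by simp
    rw [if_pos ⟨hne, by rw [PySem.List.pyGetD_neg_one_append_singleton]⟩]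
    simp
  · simp only [Bool.not_eq_true] at hq
    simp only [hq, Bool.false_eq_true, if_false, List.append_nil]
    by_cases hPe : P = []
    · rw [if_neg (by simp [hPe])]
    · rw [if_neg ?_]
      rintro ⟨-, hlast⟩
      rw [PySem.List.pyGetD_neg_one P 0 hPe] at hlast
      exact absurd hlast (by have := hmemP _ (List.getLast_mem hPe); omega)

-- ===== VERDICT (by name: the statement is the Claim_ definition above) =====
theorem stableMountains_spec : Claim_equal_stableMountains := by
  intro height threshold _
  unfold Spec_stableMountains stableMountains stableMountains_alt
  have hA := stableMountains_loop height threshold height.length 0 [] false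
  rcases Nat.eq_zero_or_pos height.length with hn | hn
  · simp [hn, PySem.List.pyRange_one_eq_nil]
  · have hB := stableMountains_trim
      (fun j => decide (PySem.List.pyGetD height j 0 > threshold)) height.length hn
    simp only at hB ⊢
    rw [hB]
    have hS := stableMountains_shift
      (fun j => decide (PySem.List.pyGetD height j 0 > threshold))
      (height.length - 1) 0
    simp only [zero_add] at hS
    have hc1 : ((height.length - 1 : Nat) : Int) = (height.length : Int) - 1 := by omega
    rw [hc1] at hS
    have hc2 : (1 : Int) + ((height.length : Int) - 1) = (height.length : Int) := by ring
    rw [hc2] at hS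
    rw [hS]
    have h0 := hA
    simpa using h0
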